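-- pv_equiv track=rewrite | github.com/pablokvitca/cs3200-base-data-scrapper | class_prereqs_scrapper.py | parse_prereq_nested_groups
-- ===== SOURCE A (Python) =====
-- def parse_prereq_nested_groups(expr):
--     def _helper(iter):
--         items = []
--         for item in iter:
--             if item == '(':
--                 result, closeparen = _helper(iter)
--                 if not closeparen:
--                     raise ValueError("bad expression -- unbalanced parentheses")
--                 items.append(item)
--                 items.append(result)
--             elif item == ')':
--                 items.append(item)
--                 return ''.join(items), True
--             else:
--                 items.append(item)
--         return items, False
--
--     def re_join_joints(g_temp):
--         g_res = []
--         i_temp = None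
--         for i in g_temp:
--             if len(i) > 1 or i is '(':
--                 if i_temp is not None:
--                     g_res.append(i_temp)
--                     i_temp = None
--                 g_res.append(i)
--             else:
--                 if i_temp is not None:
--                     i_temp += i
--                 else:
--                     i_temp = i
--         return g_res
--
--     def re_join_group_openings(g_temp):
--         g_res = []
--         should_add_parens = False
--         for i in g_temp:
--             if i is '(':
--                 should_add_parens = True
--             else:
--                 if should_add_parens:
--                     i = '(' + i
--                     should_add_parens = False
--                 g_res.append(i)
--         return g_res
--
--     if "(" in expr and ")" in expr:
--         g_temp1 = _helper(iter(expr))[0]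
--         g_temp2 = re_join_joints(g_temp1)
--         return re_join_group_openings(g_temp2)
--     else:
--         return [expr]
-- ===== SOURCE B (Python) =====
-- def parse_prereq_nested_groups(expr):
--     # Explicit-stack parser plus one fused grouping pass; raises ValueError on any
--     # unbalanced parentheses.
--     if "(" not in expr or ")" not in expr:
--         return [expr]
--     stack = [[]]
--     for ch in expr:
--         if ch == '(':
--             stack.append([])
--         elif ch == ')':
--             frame = stack.pop()
--             if not stack:
--                 raise ValueError("bad expression -- unbalanced parentheses")
--             frame.append(')')
--             stack[-1].append('(')
--             stack[-1].append(''.join(frame))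
--         else:
--             stack[-1].append(ch)
--     if len(stack) > 1:
--         raise ValueError("bad expression -- unbalanced parentheses")
--     res = []
--     run = None
--     flag = False
--     for i in stack[0]:
--         if len(i) > 1 or i == '(':
--             if run is not None:
--                 res.append('(' + run if flag else run)
--                 run = None
--                 flag = False
--             if i == '(':
--                 flag = True
--             else:
--                 res.append('(' + i if flag else i)
--                 flag = False
--         else:
--             run = run + i if run is not None else i
--     return res
-- ===== Notes on version B (the rewrite author's own statement) =====
-- stated objective: alternative
-- what changed: A's recursive _helper over a shared character iterator is replaced by an explicit-stack single loop, and A's two clean-up passes (re_join_joints, re_join_group_openings) are fused into one pass; Pre_ excludes exactly the unbalanced-parenthesis inputs, where B raises ValueError while A either raises too (surplus of opening parens) or returns an accidental value after truncating the input at a stray top-level closing paren.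
-- outside the precondition, e.g. on parse_prereq_nested_groups('a) (b)'): A returns [], B raises ValueError
import Mathlib
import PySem

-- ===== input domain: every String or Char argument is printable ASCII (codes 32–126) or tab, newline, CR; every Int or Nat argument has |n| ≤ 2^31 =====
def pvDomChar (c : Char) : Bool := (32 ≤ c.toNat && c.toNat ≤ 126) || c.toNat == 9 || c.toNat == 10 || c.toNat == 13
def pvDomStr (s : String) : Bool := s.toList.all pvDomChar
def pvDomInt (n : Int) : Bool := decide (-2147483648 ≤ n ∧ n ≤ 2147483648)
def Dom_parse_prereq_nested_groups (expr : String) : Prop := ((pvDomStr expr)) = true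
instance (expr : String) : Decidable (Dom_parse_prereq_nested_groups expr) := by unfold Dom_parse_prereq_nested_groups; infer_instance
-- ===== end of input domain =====

-- B replaces A's recursive `_helper` by an explicit-stack loop and fuses A's two clean-up
-- passes into one; equal return value on every balanced (or paren-free) input (objective:
-- alternative).  Strings are handled as List Char throughout (Python's 1-char interned
-- strings make `is '('` coincide with equality on every value these programs build, so
-- `is` is ported as `=`).

-- ===== PORT A =====
-- _helper: the shared character iterator is the explicit `rest` list threaded through;
-- `items` is the accumulator (reversed).  Fuel (= length of input + 1, always enough) only
-- makes the shared-iterator recursion structural; `none` = ValueError.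
def pvAHelper : Nat → List Char → List (List Char) → Option ((List (List Char) ⊕ List Char) × List Char)
  | 0, _, _ => none
  | _ + 1, [], items => some (.inl items.reverse, [])
  | f + 1, c :: rest, items =>
      if c = '(' then
        match pvAHelper f rest [] with
        | some (.inr s, rest') => pvAHelper f rest' (s :: ['('] :: items)
        | _ => none          -- `not closeparen` (or inner raise): ValueError
      else if c = ')' then
        some (.inr ((items.reverse ++ [[')']]).flatten), rest)   -- ''.join(items) after appending ')'
      else pvAHelper f rest ([c] :: items)

-- re_join_joints; `itemp` is Python's i_temp (a pending i_temp is dropped at the end, as in A)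
def pvAJoints : List (List Char) → Option (List Char) → List (List Char)
  | [], _ => []
  | i :: rest, itemp =>
      if 1 < i.length ∨ i = ['('] then
        match itemp with
        | some t => t :: i :: pvAJoints rest none
        | none => i :: pvAJoints rest none
      else
        match itemp with
        | some t => pvAJoints rest (some (t ++ i))
        | none => pvAJoints rest (some i)

-- re_join_group_openings; the Bool is should_add_parens
def pvAOpenings : List (List Char) → Bool → List (List Char)
  | [], _ => []
  | i :: rest, flag =>
      if i = ['('] then pvAOpenings rest true
      else (if flag then '(' :: i else i) :: pvAOpenings rest false

-- g_temp1 = _helper(iter(expr))[0]: a list of items, or (stray top-level ')') a string,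
-- which the later passes then iterate character by character.
def pvATop1 (cs : List Char) : List (List Char) :=
  match pvAHelper (cs.length + 1) cs [] with
  | some (.inl items, _) => items
  | some (.inr s, _) => s.map (fun c => [c])
  | none => []        -- Python raises ValueError here (outside Pre_)

def parse_prereq_nested_groups (expr : String) : List String :=
  if '(' ∈ expr.toList ∧ ')' ∈ expr.toList then   -- "(" in expr and ")" in expr (1-char substrings)
    (pvAOpenings (pvAJoints (pvATop1 expr.toList) none) false).map (fun l => String.ofList l)
  else [expr]

-- ===== PORT B =====
-- explicit-stack loop: `cur` is the open top frame (reversed), `stk` the outer open frames;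
-- `none` = ValueError (pop of the last frame on ')', or leftover open frames at the end)
def pvBLoop : List Char → List (List Char) → List (List (List Char)) → Option (List (List Char))
  | [], cur, stk =>
      match stk with
      | [] => some cur.reverse
      | _ :: _ => none     -- unbalanced: Python B raises ValueError (outside Pre_)
  | c :: cs, cur, stk =>
      if c = '(' then pvBLoop cs [] (cur :: stk)
      else if c = ')' then
        match stk with
        | [] => none       -- unbalanced: Python B raises ValueError (outside Pre_)
        | parent :: rs => pvBLoop cs (((cur.reverse ++ [[')']]).flatten) :: ['('] :: parent) rs
      else pvBLoop cs ([c] :: cur) stk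

-- single fused pass doing the work of A's two passes: `run` is the pending joined run,
-- `flag` the pending '(' prefix
def pvBFused : List (List Char) → Option (List Char) → Bool → List (List Char)
  | [], _, _ => []
  | i :: rest, run, flag =>
      if 1 < i.length ∨ i = ['('] then
        match run with
        | some r =>
            (if flag then '(' :: r else r) ::
              (if i = ['('] then pvBFused rest none true else i :: pvBFused rest none false)
        | none =>
            if i = ['('] then pvBFused rest none true
            else (if flag then '(' :: i else i) :: pvBFused rest none false
      else pvBFused rest (match run with | some r => some (r ++ i) | none => some i) flag

def parse_prereq_nested_groups_alt (expr : String) : List String :=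
  if '(' ∈ expr.toList ∧ ')' ∈ expr.toList then
    (pvBFused ((pvBLoop expr.toList [] []).getD []) none false).map (fun l => String.ofList l)
  else [expr]

-- ===== PRECONDITION & SPEC =====
-- Pre_ excludes exactly the inputs whose parentheses are unbalanced (both paren chars
-- present but not balanced): there B raises ValueError, while A either raises the same
-- ValueError (surplus of opening parens) or returns an accidental value obtained by
-- truncating the input at a stray top-level closing paren and re-scanning the joined prefix.
def Pre_parse_prereq_nested_groups (expr : String) : Prop :=
  ('(' ∈ expr.toList ∧ ')' ∈ expr.toList) →
    ((∀ k < expr.toList.length, expr.toList.getD k ' ' = ')' →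
        (expr.toList.take k).count ')' < (expr.toList.take k).count '(') ∧
     expr.toList.count '(' = expr.toList.count ')')
instance (expr : String) : Decidable (Pre_parse_prereq_nested_groups expr) := by
  unfold Pre_parse_prereq_nested_groups; infer_instance

def pvWitness_parse_prereq_nested_groups : String := "CS1 and (CS2 or MA1)"

def Spec_parse_prereq_nested_groups (expr : String) (out : List String) : Prop := out = parse_prereq_nested_groups_alt expr
instance (expr : String) (out : List String) : Decidable (Spec_parse_prereq_nested_groups expr out) := by unfold Spec_parse_prereq_nested_groups; infer_instance

-- ===== CLAIM (what is proved, stated in full; the proofs are below) =====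
def Claim_equal_parse_prereq_nested_groups : Prop := ∀ (expr : String), Dom_parse_prereq_nested_groups expr → Pre_parse_prereq_nested_groups expr → Spec_parse_prereq_nested_groups expr (parse_prereq_nested_groups expr)

-- ===== LEMMAS AND PROOFS =====

-- resuming A's recursion result against B's remaining stack of open frames
def pvResume : Option ((List (List Char) ⊕ List Char) × List Char) → List (List (List Char)) → Option (List (List Char))
  | none, _ => none
  | some (.inl items, _), stk =>
      match stk with
      | [] => some items
      | _ :: _ => none
  | some (.inr s, rest), stk =>
      match stk with
      | [] => none
      | parent :: rs => pvBLoop rest (s :: ['('] :: parent) rs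

-- the leftover iterator A's helper returns is a suffix of its input
theorem pvAHelper_rest_le (f : Nat) : ∀ (cs : List Char) (items : List (List Char)) r rest,
    pvAHelper f cs items = some (r, rest) → rest.length ≤ cs.length := by
  induction f with
  | zero => intro cs items r rest h; simp [pvAHelper] at h
  | succ g ih =>
    intro cs items r rest h
    match cs with
    | [] =>
      simp [pvAHelper] at h
      simp [h.2]
    | c :: cs' =>
      by_cases h1 : c = '('
      · simp only [pvAHelper, if_pos h1] at h
        cases hrec : pvAHelper g cs' [] with
        | none => rw [hrec] at h; simp at h
        | some v =>
          obtain ⟨r1, rest1⟩ := v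
          cases r1 with
          | inl l => rw [hrec] at h; simp at h
          | inr s =>
            rw [hrec] at h
            simp only at h
            have h2 := ih _ _ _ _ h
            have h3 := ih _ _ _ _ hrec
            simp; omega
      · by_cases h2 : c = ')'
        · simp only [pvAHelper, if_neg h1, if_pos h2, Option.some.injEq, Prod.mk.injEq] at h
          simp [← h.2]
        · simp only [pvAHelper, if_neg h1, if_neg h2] at h
          have := ih _ _ _ _ h
          simp; omega

-- the explicit-stack loop computes the recursion resumed against the stack
theorem pvBLoop_eq_resume (f : Nat) : ∀ (cs : List Char) (cur : List (List Char)) stk,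
    cs.length < f → pvBLoop cs cur stk = pvResume (pvAHelper f cs cur) stk := by
  induction f with
  | zero => intro cs cur stk h; omega
  | succ g ih =>
    intro cs cur stk h
    match cs with
    | [] =>
      simp only [pvAHelper, pvBLoop, pvResume]
    | c :: cs' =>
      have hlen : cs'.length < g := by simp at h; omega
      by_cases h1 : c = '('
      · simp only [pvAHelper, pvBLoop, if_pos h1]
        rw [ih cs' [] (cur :: stk) hlen]
        cases hrec : pvAHelper g cs' [] with
        | none => simp [pvResume]
        | some v =>
          obtain ⟨r1, rest1⟩ := v
          cases r1 with
          | inl l => simp [pvResume]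
          | inr s =>
            simp only [pvResume]
            have : rest1.length < g := by
              have := pvAHelper_rest_le g cs' [] _ _ hrec; omega
            exact ih rest1 (s :: ['('] :: cur) stk this
      · by_cases h2 : c = ')'
        · simp only [pvAHelper, pvBLoop, if_neg h1, if_pos h2]
          cases stk <;> simp [pvResume]
        · simp only [pvAHelper, pvBLoop, if_neg h1, if_neg h2]
          exact ih cs' ([c] :: cur) stk hlen

-- on balanced input (relative to the current stack depth) the explicit-stack loop succeeds
theorem pvBLoop_total : ∀ (cs : List Char) (cur : List (List Char)) stk,
    (∀ k < cs.length, cs.getD k ' ' = ')' →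
        (cs.take k).count ')' < (cs.take k).count '(' + stk.length) →
    cs.count '(' + stk.length = cs.count ')' →
    ∃ items, pvBLoop cs cur stk = some items := by
  intro cs
  induction cs with
  | nil =>
    intro cur stk _ hc
    simp at hc
    subst hc
    exact ⟨cur.reverse, rfl⟩
  | cons c cs' ih =>
    intro cur stk hk hc
    by_cases h1 : c = '('
    · simp only [pvBLoop, if_pos h1]
      refine ih [] (cur :: stk) ?_ ?_
      · intro k hκ hg
        have h3 := hk (k + 1) (by simp; omega) (by simpa [List.getD] using hg)
        simp [List.take_succ_cons, h1] at h3
        simp only [List.length_cons]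
        omega
      · have : (c :: cs').count '(' = cs'.count '(' + 1 := by simp [h1]
        have h2 : (c :: cs').count ')' = cs'.count ')' := by simp [h1]
        simp only [List.length_cons]
        omega
    · by_cases h2 : c = ')'
      · have h0 := hk 0 (by simp) (by simp [List.getD, h2])
        simp at h0
        match stk with
        | [] => simp at h0
        | parent :: rs =>
          simp only [pvBLoop, if_neg h1, if_pos h2]
          refine ih _ rs ?_ ?_
          · intro k hκ hg
            have := hk (k + 1) (by simp; omega) (by simpa [List.getD] using hg)
            simp only [List.take_succ_cons, List.count_cons, h2, List.length_cons] at this ⊢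
            simp at this
            omega
          · have ha : (c :: cs').count ')' = cs'.count ')' + 1 := by simp [h2]
            have hb : (c :: cs').count '(' = cs'.count '(' := by simp [h2]
            simp only [List.length_cons] at hc
            omega
      · simp only [pvBLoop, if_neg h1, if_neg h2]
        refine ih _ stk ?_ ?_
        · intro k hκ hg
          have := hk (k + 1) (by simp; omega) (by simpa [List.getD] using hg)
          simpa [List.take_succ_cons, List.count_cons, h1, h2] using this
        · simpa [List.count_cons, h1, h2] using hc

-- the fused pass equals A's two passes composed, for any state whose pending run is not "("
theorem pvBFused_eq (g : List (List Char)) : ∀ (run : Option (List Char)) (flag : Bool),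
    (∀ r, run = some r → r ≠ ['(']) →
    pvBFused g run flag = pvAOpenings (pvAJoints g run) flag := by
  induction g with
  | nil => intro run flag _; cases run <;> simp [pvBFused, pvAJoints, pvAOpenings]
  | cons i rest ih =>
    intro run flag hrun
    by_cases hbig : 1 < i.length ∨ i = ['(']
    · cases run with
      | none =>
        simp only [pvBFused, pvAJoints, if_pos hbig]
        by_cases hi : i = ['(']
        · simp only [if_pos hi, pvAOpenings]
          exact ih none true (by simp)
        · simp only [if_neg hi, pvAOpenings]
          rw [ih none false (by simp)]
      | some t =>
        have ht : t ≠ ['('] := hrun t rfl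
        simp only [pvBFused, pvAJoints, if_pos hbig]
        by_cases hi : i = ['(']
        · simp only [if_pos hi, pvAOpenings, if_neg ht]
          rw [ih none true (by simp)]
        · simp only [if_neg hi, pvAOpenings, if_neg ht]
          rw [ih none false (by simp)]
          simp
    · have hi : i ≠ ['('] := fun h => hbig (Or.inr h)
      simp only [pvBFused, pvAJoints, if_neg hbig]
      cases run with
      | none =>
        exact ih (some i) flag (by intro r hr; simp at hr; exact hr ▸ hi)
      | some t =>
        have ht : t ≠ ['('] := hrun t rfl
        refine ih (some (t ++ i)) flag ?_
        intro r hr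
        simp at hr
        rw [← hr]
        intro hcontra
        rcases List.append_eq_cons_iff.mp hcontra with ⟨h1, h2⟩ | ⟨a, h1, h2⟩
        · exact hi h2
        · rcases List.append_eq_nil_iff.mp h2.symm with ⟨ha, hb⟩
          rw [h1, ha] at ht
          exact ht rfl

-- ===== VERDICT (by name: the statement is the Claim_ definition above) =====
theorem parse_prereq_nested_groups_spec : Claim_equal_parse_prereq_nested_groups := by
  intro expr _ hpre
  unfold Spec_parse_prereq_nested_groups parse_prereq_nested_groups parse_prereq_nested_groups_alt
  by_cases hg : '(' ∈ expr.toList ∧ ')' ∈ expr.toList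
  · simp only [if_pos hg]
    obtain ⟨hk, hc⟩ := hpre hg
    obtain ⟨items, hB⟩ :=
      pvBLoop_total expr.toList [] [] (by intro k h1 h2; simpa using hk k h1 h2) (by simpa using hc)
    have hR := pvBLoop_eq_resume (expr.toList.length + 1) expr.toList [] [] (by omega)
    rw [hB] at hR
    have hTop : pvATop1 expr.toList = items := by
      unfold pvATop1
      cases hA : pvAHelper (expr.toList.length + 1) expr.toList [] with
      | none => rw [hA] at hR; simp [pvResume] at hR
      | some v =>
        obtain ⟨r, rest⟩ := v
        cases r with
        | inl l => rw [hA] at hR; simpa [pvResume] using hR.symm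
        | inr s => rw [hA] at hR; simp [pvResume] at hR
    rw [hTop, pvBFused_eq _ none false (by simp), hB]
    simp
  · simp only [if_neg hg]
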